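-- pv_equiv track=rewrite | github.com/ManojKumarBhagavatula/PythonPrograms | PythonPrograms/my_package/Amazon.py | getOutlierValue
-- ===== SOURCE A (Python) =====
-- def getOutlierValue(arr):
--
--     sum_arr = sum(arr)
--     outliers = []
--     for i in range(len(arr)):
--         rem_sum = sum_arr - arr[i]
--         if arr[i] not in arr[:i] + arr[i+1:] and arr[i] != rem_sum:
--             outliers.append(arr[i])
--     return max(outliers)
-- ===== SOURCE B (Python) =====
-- def getOutlierValue(arr):
--     total = sum(arr)
--     s = sorted(arr)
--     n = len(s)
--     for i in range(n - 1, -1, -1):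
--         x = s[i]
--         if (i == 0 or s[i - 1] != x) and (i == n - 1 or s[i + 1] != x) and 2 * x != total:
--             return x
--     raise ValueError("no outlier value")
-- ===== Notes on version B (the rewrite author's own statement) =====
-- stated objective: faster
-- what changed: B sorts the list once and walks the sorted copy from the largest element downward, using adjacency of equal values in sorted order as the uniqueness test and returning at the first qualifying element, instead of A's per-index slice-concatenation membership filter followed by max().
import Mathlib
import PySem

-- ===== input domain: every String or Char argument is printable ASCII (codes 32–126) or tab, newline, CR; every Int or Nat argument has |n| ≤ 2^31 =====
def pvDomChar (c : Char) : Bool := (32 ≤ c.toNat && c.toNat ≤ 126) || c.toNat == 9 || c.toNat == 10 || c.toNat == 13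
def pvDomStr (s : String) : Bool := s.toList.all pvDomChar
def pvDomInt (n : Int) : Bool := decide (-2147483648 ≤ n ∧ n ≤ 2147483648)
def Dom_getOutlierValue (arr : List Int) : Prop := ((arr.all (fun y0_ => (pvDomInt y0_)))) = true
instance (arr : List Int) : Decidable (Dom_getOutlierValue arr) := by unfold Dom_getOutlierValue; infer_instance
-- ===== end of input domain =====

-- B sorts the list once and scans it from the largest element down, using sorted-adjacency
-- to test uniqueness, instead of A's per-index slice-membership filter followed by max().
-- Both A and B raise ValueError when no element qualifies; Pre_ excludes exactly those inputs.


-- ===== PORT A =====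
def getOutlierValue (arr : List Int) : Int :=
  let sum_arr := arr.sum
  let outliers : List Int :=
    (PySem.List.pyRange 0 arr.length 1).foldl (fun outliers i =>
      let x := PySem.List.pyGetD arr i 0
      let rem_sum := sum_arr - x
      if x ∉ PySem.List.slice arr none (some i) ++ PySem.List.slice arr (some (i + 1)) none ∧
          x ≠ rem_sum then
        outliers ++ [x]
      else outliers) []
  -- max(outliers): the ValueError on an empty list is excluded by Pre_
  (PySem.List.max? outliers (fun y => y)).getD 0

-- ===== PORT B =====
def getOutlierValue_alt (arr : List Int) : Int :=
  let total := arr.sum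
  let s := PySem.List.sorted arr (fun y => y) false
  let n : Int := s.length
  -- 'for i in range(n-1, -1, -1): … return x' with early return = find? over the countdown range
  match (PySem.List.pyRange (n - 1) (-1) (-1)).find? (fun i =>
    let x := PySem.List.pyGetD s i 0
    (i == 0 || PySem.List.pyGetD s (i - 1) 0 != x) &&
    (i == n - 1 || PySem.List.pyGetD s (i + 1) 0 != x) &&
    2 * x != total) with
  | some i => PySem.List.pyGetD s i 0
  | none => 0  -- 'raise ValueError' is excluded by Pre_

-- ===== PRECONDITION & SPEC =====
-- Pre_ excludes exactly the inputs on which both A and B raise ValueError (no qualifying element):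
-- there must exist an element occurring once whose doubled value differs from the total sum.
def Pre_getOutlierValue (arr : List Int) : Prop :=
  ∃ x ∈ arr, arr.count x = 1 ∧ 2 * x ≠ arr.sum
instance (arr : List Int) : Decidable (Pre_getOutlierValue arr) := by
  unfold Pre_getOutlierValue; infer_instance
def pvWitness_getOutlierValue : List Int := [1, 2, 3]

def Spec_getOutlierValue (arr : List Int) (out : Int) : Prop := out = getOutlierValue_alt arr
instance (arr : List Int) (out : Int) : Decidable (Spec_getOutlierValue arr out) := by unfold Spec_getOutlierValue; infer_instance

-- ===== CLAIM (what is proved, stated in full; the proofs are below) =====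
def Claim_equal_getOutlierValue : Prop := ∀ (arr : List Int), Dom_getOutlierValue arr → Pre_getOutlierValue arr → Spec_getOutlierValue arr (getOutlierValue arr)

-- ===== LEMMAS AND PROOFS =====

-- the qualifying predicate both programs select by: occurs once and differs from the sum of the rest
def pvOutlier (arr : List Int) (x : Int) : Bool :=
  decide (arr.count x = 1 ∧ 2 * x ≠ arr.sum)

-- for k < |arr|, arr[k] is absent from arr[:k] ++ arr[k+1:] iff it occurs exactly once in arr
lemma pv_mem_punctured (arr : List Int) (k : Nat) (hk : k < arr.length) :
    (arr.getD k 0 ∈ arr.take k ++ arr.drop (k + 1)) ↔ arr.count (arr.getD k 0) ≠ 1 := by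
  have hx : arr.getD k 0 = arr[k] := List.getD_eq_getElem arr 0 hk
  have hdrop : arr.drop k = arr[k] :: arr.drop (k + 1) := List.drop_eq_getElem_cons hk
  have hcnt : ∀ x : Int, x = arr[k] →
      arr.count x = (arr.take k).count x + ((arr.drop (k+1)).count x + 1) := by
    intro x hxx
    conv_lhs => rw [← List.take_append_drop k arr]
    rw [List.count_append, hdrop, hxx, List.count_cons_self]
  have h := hcnt _ rfl
  rw [hx, List.mem_append, ← List.count_pos_iff, ← List.count_pos_iff]
  omega

-- selecting-and-reading indices of a list is filtering the list
lemma pv_range_filter_map (l : List Int) (r : Int → Bool) :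
    ((List.range l.length).filter (fun k => r (l.getD k 0))).map (fun k => l.getD k 0)
      = l.filter r := by
  induction l with
  | nil => simp
  | cons a t ih =>
    rw [List.length_cons, List.range_succ_eq_map]
    simp only [List.filter_cons, List.getD_cons_zero, List.filter_map]
    by_cases hr : r a
    · simp only [hr, if_pos, List.map_cons, List.getD_cons_zero, List.map_map]
      rw [List.cons_inj_right]
      simpa [Function.comp_def, List.getD_eq_getElem?_getD] using ih
    · simp only [hr, Bool.false_eq_true]
      simpa [Function.comp_def, List.getD_eq_getElem?_getD, hr] using ih

-- A's loop builds exactly the filtered list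
lemma pvA_outliers (arr : List Int) :
    (PySem.List.pyRange 0 arr.length 1).foldl (fun outliers i =>
      let x := PySem.List.pyGetD arr i 0
      if x ∉ PySem.List.slice arr none (some i) ++ PySem.List.slice arr (some (i + 1)) none ∧
          x ≠ arr.sum - x then outliers ++ [x] else outliers) []
      = arr.filter (pvOutlier arr) := by
  rw [PySem.List.pyRange_zero_nat arr.length, List.foldl_map]
  rw [PySem.List.foldl_congr_mem _ _
    (fun (acc : List Int) (k : Nat) =>
      if pvOutlier arr (arr.getD k 0) = true then acc ++ [arr.getD k 0] else acc) []
    ?_]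
  · rw [PySem.List.foldl_append_if (fun k => pvOutlier arr (arr.getD k 0))
        (fun k => arr.getD k 0) (List.range arr.length) []]
    simpa using pv_range_filter_map arr (pvOutlier arr)
  · intro acc k hk
    rw [List.mem_range] at hk
    have h1 : PySem.List.pyGetD arr (k : Int) 0 = arr.getD k 0 := PySem.List.pyGetD_natCast arr k 0
    have h2 : PySem.List.slice arr none (some (k : Int)) = arr.take k :=
      PySem.List.slice_to_natCast arr k
    have h3 : PySem.List.slice arr (some ((k : Int) + 1)) none = arr.drop (k + 1) := by
      have : ((k : Int) + 1) = ((k + 1 : Nat) : Int) := by push_cast; ring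
      rw [this]
      exact PySem.List.slice_from_natCast arr (k + 1)
    simp only [h1, h2, h3]
    refine if_congr ?_ rfl rfl
    rw [pvOutlier, decide_eq_true_eq, pv_mem_punctured arr k hk]
    constructor <;> (rintro ⟨ha, hb⟩; constructor <;> omega)

lemma pvA_eq (arr : List Int) :
    getOutlierValue arr = (PySem.List.max? (arr.filter (pvOutlier arr)) (fun y => y)).getD 0 := by
  simp only [getOutlierValue]
  rw [pvA_outliers]

-- find? is head?-of-filter
lemma pv_find?_eq_head?_filter {α : Type} (p : α → Bool) (l : List α) :
    l.find? p = (l.filter p).head? := by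
  induction l with
  | nil => rfl
  | cons a t ih =>
    by_cases hp : p a
    · rw [List.find?_cons_of_pos hp, List.filter_cons_of_pos hp, List.head?_cons]
    · rw [List.find?_cons_of_neg hp, List.filter_cons_of_neg hp, ih]

-- in a sorted list, the neighbour test at position k is exactly 'occurs once'
lemma pv_adjacent_unique (s : List Int) (hs : s.Pairwise (· ≤ ·)) (k : Nat) (hk : k < s.length) :
    (((k = 0 ∨ s.getD (k - 1) 0 ≠ s.getD k 0) ∧
      (k = s.length - 1 ∨ s.getD (k + 1) 0 ≠ s.getD k 0))
       ↔ s.count (s.getD k 0) = 1) := by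
  have hmono : ∀ p q : Nat, (hpq : p ≤ q) → (hq : q < s.length) → s[p]'(by omega) ≤ s[q] := by
    intro p q hpq hq
    rcases Nat.lt_or_ge p q with h | h
    · exact (List.pairwise_iff_getElem.mp hs) p q (by omega) hq h
    · have : p = q := by omega
      subst this; exact le_refl _
  have hget : ∀ j : Nat, (hj : j < s.length) → s.getD j 0 = s[j] :=
    fun j hj => List.getD_eq_getElem s 0 hj
  have htake : s.getD k 0 ∈ s.take k ↔ (k ≠ 0 ∧ s.getD (k - 1) 0 = s.getD k 0) := by
    rw [hget k hk]
    constructor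
    · intro hmem
      rw [List.mem_iff_getElem] at hmem
      obtain ⟨j, hj, hje⟩ := hmem
      have hjk : j < k := by simp at hj; omega
      have hk1 : k - 1 < s.length := by omega
      have hje' : s[j]'(by omega) = s[k] := by
        rw [← hje]; exact (List.getElem_take).symm
      have h1 : s[j]'(by omega) ≤ s[k-1]'hk1 := hmono j (k-1) (by omega) hk1
      have h2 : s[k-1]'hk1 ≤ s[k] := hmono (k-1) k (by omega) hk
      refine ⟨by omega, ?_⟩
      rw [hget (k-1) hk1]
      omega
    · rintro ⟨h0, he⟩
      have hk1 : k - 1 < s.length := by omega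
      rw [hget (k-1) hk1] at he
      rw [List.mem_iff_getElem]
      refine ⟨k - 1, by simp; omega, ?_⟩
      rw [List.getElem_take]
      exact he
  have hdropm : s.getD k 0 ∈ s.drop (k + 1) ↔
      (k ≠ s.length - 1 ∧ s.getD (k + 1) 0 = s.getD k 0) := by
    rw [hget k hk]
    constructor
    · intro hmem
      rw [List.mem_iff_getElem] at hmem
      obtain ⟨j, hj, hje⟩ := hmem
      have hjlen : k + 1 + j < s.length := by simp at hj; omega
      have hje' : s[k+1+j]'hjlen = s[k] := by
        rw [← hje]; exact (List.getElem_drop).symm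
      have hk1 : k + 1 < s.length := by omega
      have h1 : s[k]'hk ≤ s[k+1]'hk1 := hmono k (k+1) (by omega) hk1
      have h2 : s[k+1]'hk1 ≤ s[k+1+j]'hjlen := hmono (k+1) (k+1+j) (by omega) hjlen
      refine ⟨by omega, ?_⟩
      rw [hget (k+1) hk1]
      omega
    · rintro ⟨h0, he⟩
      have hk1 : k + 1 < s.length := by omega
      rw [hget (k+1) hk1] at he
      rw [List.mem_iff_getElem]
      refine ⟨0, by simp; omega, ?_⟩
      rw [List.getElem_drop]
      simpa using he
  have hnot := (pv_mem_punctured s k hk).not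
  rw [not_not] at hnot
  rw [← hnot, List.mem_append, not_or, htake, hdropm]
  tauto

-- a sorted running maximum ends at the last element
lemma pv_foldl_max_sorted (t : List Int) (x : Int) (hx : ∀ y ∈ t, x ≤ y)
    (ht : t.Pairwise (· ≤ ·)) : t.foldl max x = t.getLast?.getD x := by
  induction t generalizing x with
  | nil => rfl
  | cons b u ih =>
    have hxb : x ≤ b := hx b List.mem_cons_self
    have hbu : ∀ y ∈ u, b ≤ y := fun y hy => (List.pairwise_cons.mp ht).1 y hy
    have hu : u.Pairwise (· ≤ ·) := (List.pairwise_cons.mp ht).2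
    rw [List.foldl_cons, max_eq_right hxb, ih b hbu hu]
    cases u with
    | nil => rfl
    | cons c v =>
      rw [List.getLast?_cons_cons]
      cases h : (c :: v).getLast? with
      | none => exact absurd (List.getLast?_eq_none_iff.mp h) (by simp)
      | some z => rfl

-- Python max of a sorted list is its last element
lemma pv_max_sorted (l : List Int) (hl : l.Pairwise (· ≤ ·)) :
    PySem.List.max? l (fun y => y) = l.getLast? := by
  cases l with
  | nil => simp [PySem.List.max?_eq_none_iff]
  | cons x t =>
    rw [PySem.List.max?_id_cons,
      pv_foldl_max_sorted t x (fun y hy => (List.pairwise_cons.mp hl).1 y hy)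
        (List.pairwise_cons.mp hl).2]
    cases t with
    | nil => rfl
    | cons c v =>
      rw [List.getLast?_cons_cons]
      cases h : (c :: v).getLast? with
      | none => exact absurd (List.getLast?_eq_none_iff.mp h) (by simp)
      | some z => rfl

-- Python max of an Int list depends only on the multiset of elements
lemma pv_max_perm (l l' : List Int) (h : l.Perm l') :
    PySem.List.max? l (fun y => y) = PySem.List.max? l' (fun y => y) := by
  rcases hm : PySem.List.max? l (fun y => y) with _ | m
  · rw [PySem.List.max?_eq_none_iff] at hm
    subst hm
    rw [Eq.comm, PySem.List.max?_eq_none_iff]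
    exact h.nil_eq.symm
  · rcases hm' : PySem.List.max? l' (fun y => y) with _ | m'
    · rw [PySem.List.max?_eq_none_iff] at hm'
      subst hm'
      rw [h.eq_nil, show (PySem.List.max? ([] : List Int) (fun y => y)) = none from
        (PySem.List.max?_eq_none_iff _ _).mpr rfl] at hm
      cases hm
    · have h1 : m ∈ l' := h.mem_iff.mp (PySem.List.max?_mem hm)
      have h2 : m' ∈ l := h.mem_iff.mpr (PySem.List.max?_mem hm')
      have le1 : m ≤ m' := PySem.List.max?_isMax hm' m h1
      have le2 : m' ≤ m := PySem.List.max?_isMax hm m' h2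
      rw [le_antisymm le1 le2]

-- find? congruence on members
lemma pv_find?_congr {α : Type} (p q : α → Bool) (l : List α) (h : ∀ x ∈ l, p x = q x) :
    l.find? p = l.find? q := by
  induction l with
  | nil => rfl
  | cons a u ih =>
    rw [List.find?_cons, List.find?_cons, h a List.mem_cons_self,
      ih (fun x hx => h x (List.mem_cons_of_mem a hx))]

-- B computes the last element of the sorted-filtered list
lemma pvB_eq (arr : List Int) :
    getOutlierValue_alt arr
      = (((PySem.List.sorted arr (fun y => y) false).filter (pvOutlier arr)).getLast?).getD 0 := by
  simp only [getOutlierValue_alt]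
  set s := PySem.List.sorted arr (fun y => y) false with hsdef
  have hs : s.Pairwise (· ≤ ·) := PySem.List.sorted_pairwise arr (fun y => y)
  have hcnt : ∀ x : Int, s.count x = arr.count x :=
    fun x => (PySem.List.sorted_perm arr (fun y => y) false).count_eq x
  have hsum : ((s.length : Int) - 1) + 1 = (s.length : Int) := by ring
  rw [PySem.List.pyRange_neg_one_eq_reverse, neg_add_cancel, hsum,
    PySem.List.pyRange_zero_nat s.length, ← List.map_reverse, List.find?_map]
  rw [pv_find?_congr _ (fun k : Nat => pvOutlier arr (s.getD k 0)) _ ?_]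
  · rw [pv_find?_eq_head?_filter, List.filter_reverse, List.head?_reverse]
    rcases hlast : ((List.range s.length).filter (fun k => pvOutlier arr (s.getD k 0))).getLast?
      with _ | k
    · have hmap := pv_range_filter_map s (pvOutlier arr)
      rw [List.getLast?_eq_none_iff] at hlast
      rw [hlast] at hmap
      simp only [List.map_nil] at hmap
      rw [← hmap]
      rfl
    · have hmap := (List.getLast?_map (f := fun k => s.getD k 0)
        (l := (List.range s.length).filter (fun k => pvOutlier arr (s.getD k 0)))).symm
      rw [hlast, pv_range_filter_map s (pvOutlier arr)] at hmap
      simp only [Option.map_some] at hmap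
      rw [← hmap]
      simp only [Option.map_some, Option.getD_some]
      exact PySem.List.pyGetD_natCast s k 0
  · intro k hk
    rw [List.mem_reverse, List.mem_range] at hk
    have hg : PySem.List.pyGetD s (k : Int) 0 = s.getD k 0 := PySem.List.pyGetD_natCast s k 0
    have hg1 : PySem.List.pyGetD s ((k : Int) + 1) 0 = s.getD (k + 1) 0 := by
      have : ((k : Int) + 1) = ((k + 1 : Nat) : Int) := by push_cast; ring
      rw [this]; exact PySem.List.pyGetD_natCast s (k + 1) 0
    have hadj := pv_adjacent_unique s hs k hk
    have hK0 : ((k : Int) = 0) ↔ k = 0 := by omega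
    have hK1 : ((k : Int) = (s.length : Int) - 1) ↔ k = s.length - 1 := by omega
    rw [Bool.eq_iff_iff]
    simp only [Function.comp_apply, hg, hg1, pvOutlier, Bool.and_eq_true, Bool.or_eq_true,
      beq_iff_eq, bne_iff_ne, decide_eq_true_eq, ← hcnt, ← hadj, hK0, hK1]
    by_cases hk0 : k = 0
    · subst hk0
      simp
    · have hgm1 : PySem.List.pyGetD s ((k : Int) - 1) 0 = s.getD (k - 1) 0 := by
        have : ((k : Int) - 1) = ((k - 1 : Nat) : Int) := by omega
        rw [this]; exact PySem.List.pyGetD_natCast s (k - 1) 0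
      rw [hgm1]

-- ===== VERDICT (by name: the statement is the Claim_ definition above) =====
theorem getOutlierValue_spec : Claim_equal_getOutlierValue := by
  intro arr _ _
  unfold Spec_getOutlierValue
  rw [pvA_eq, pvB_eq]
  have hperm : ((PySem.List.sorted arr (fun y => y) false).filter (pvOutlier arr)).Perm
      (arr.filter (pvOutlier arr)) :=
    (PySem.List.sorted_perm arr (fun y => y) false).filter (pvOutlier arr)
  rw [pv_max_perm _ _ hperm.symm,
    pv_max_sorted _ ((PySem.List.sorted_pairwise arr (fun y => y)).filter (pvOutlier arr))]
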